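-- pv_equiv track=rewrite | github.com/vanisingh-24/Intro-To-Python | DSA_450_Questions/SearchingAndSorting/028_SmallestFactorialNumber.py | check
-- ===== SOURCE A (Python) =====
-- def check(p,n):
--     temp = p
--     count = 0
--     f = 5
--     while (f <= temp):
--         count += temp//f
--         f = f*5
--
--     return (count >= n)
-- ===== SOURCE B (Python) =====
-- def check(p, n):
--     def cnt(x):
--         return 0 if x < 5 else x // 5 + cnt(x // 5)
--     return cnt(p) >= n
-- ===== Notes on version B (the rewrite author's own statement) =====
-- stated objective: alternative
-- what changed: Replaces the iterative loop over growing powers of 5 (f = 5, 25, ...) with a recursive divide-down count: cnt(x) = 0 if x < 5 else x//5 + cnt(x//5), maintaining no explicit power of 5.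
import Mathlib
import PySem

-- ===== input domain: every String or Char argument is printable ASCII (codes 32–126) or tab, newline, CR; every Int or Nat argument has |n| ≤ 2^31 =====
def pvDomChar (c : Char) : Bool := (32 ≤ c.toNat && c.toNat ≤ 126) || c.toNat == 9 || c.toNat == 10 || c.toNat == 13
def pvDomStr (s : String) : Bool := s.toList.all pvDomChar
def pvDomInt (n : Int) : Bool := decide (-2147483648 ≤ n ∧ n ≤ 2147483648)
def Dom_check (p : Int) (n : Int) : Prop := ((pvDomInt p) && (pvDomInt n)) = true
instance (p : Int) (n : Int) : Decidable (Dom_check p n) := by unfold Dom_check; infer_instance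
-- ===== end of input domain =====

-- B replaces the loop over growing powers of 5 with a recursive divide-down count
-- (cnt x = x//5 + cnt (x//5)); a genuinely different decomposition of the same O(log p) work.


-- ===== PORT A =====
-- A's while loop: f runs over 5, 25, 125, … while f ≤ temp, accumulating count += temp//f.
-- The positivity hypothesis on f is only for termination (Python's loop runs with f ≥ 5).
def checkLoop (temp count f : Int) (hf : 0 < f) : Int :=
  if f ≤ temp then
    checkLoop temp (count + PySem.Int.floordiv temp f) (f * 5) (by omega)
  else count
termination_by (temp + 1 - f).toNat
decreasing_by omega

def check (p : Int) (n : Int) : Bool :=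
  -- temp = p; count = 0; f = 5; loop; return count >= n
  decide (checkLoop p 0 5 (by norm_num) ≥ n)

-- ===== PORT B =====
-- cnt x = 0 if x < 5 else x//5 + cnt(x//5)
def cntB (x : Int) : Int :=
  if x < 5 then 0
  else PySem.Int.floordiv x 5 + cntB (PySem.Int.floordiv x 5)
termination_by x.toNat
decreasing_by
  have h5 : PySem.Int.floordiv x 5 = x / 5 := PySem.Int.floordiv_eq_ediv_of_pos (by norm_num)
  rw [h5]
  omega

def check_alt (p : Int) (n : Int) : Bool := decide (cntB p ≥ n)

-- ===== PRECONDITION & SPEC =====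
def Spec_check (p : Int) (n : Int) (out : Bool) : Prop := out = check_alt p n
instance (p : Int) (n : Int) (out : Bool) : Decidable (Spec_check p n out) := by unfold Spec_check; infer_instance

-- ===== CLAIM (what is proved, stated in full; the proofs are below) =====
def Claim_equal_check : Prop := ∀ (p : Int) (n : Int), Dom_check p n → Spec_check p n (check p n)

-- ===== LEMMAS AND PROOFS =====

-- dividing temp by 5 commutes with stepping the power of 5 in A's loop
theorem checkLoop_shift : ∀ (m : Nat) (temp f c : Int) (hf : 0 < f),
    (temp + 1 - 5 * f).toNat ≤ m →
    checkLoop temp c (5 * f) (by omega) = checkLoop (PySem.Int.floordiv temp 5) c f hf := by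
  intro m
  induction m with
  | zero =>
    intro temp f c hf hm
    have hlt : ¬ (5 * f ≤ temp) := by omega
    have hd5 : PySem.Int.floordiv temp 5 = temp / 5 :=
      PySem.Int.floordiv_eq_ediv_of_pos (by norm_num)
    have hlt' : ¬ (f ≤ PySem.Int.floordiv temp 5) := by
      rw [hd5, Int.le_ediv_iff_mul_le (by norm_num)]; omega
    conv_lhs => rw [checkLoop]
    conv_rhs => rw [checkLoop]
    rw [if_neg hlt, if_neg hlt']
  | succ m ih =>
    intro temp f c hf hm
    have hd5 : PySem.Int.floordiv temp 5 = temp / 5 :=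
      PySem.Int.floordiv_eq_ediv_of_pos (by norm_num)
    have hiff : (5 * f ≤ temp) ↔ (f ≤ PySem.Int.floordiv temp 5) := by
      rw [hd5, Int.le_ediv_iff_mul_le (by norm_num)]; omega
    by_cases hc : 5 * f ≤ temp
    · have hc' : f ≤ PySem.Int.floordiv temp 5 := hiff.mp hc
      have hq : PySem.Int.floordiv temp (5 * f) =
          PySem.Int.floordiv (PySem.Int.floordiv temp 5) f := by
        rw [hd5, PySem.Int.floordiv_eq_ediv_of_pos (by omega : (0:Int) < 5 * f),
            PySem.Int.floordiv_eq_ediv_of_pos hf]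
        exact (Int.ediv_ediv_of_nonneg (by norm_num : (0:Int) ≤ 5)).symm
      conv_lhs => rw [checkLoop]
      conv_rhs => rw [checkLoop]
      rw [if_pos hc, if_pos hc', hq]
      have heq : checkLoop temp (c + PySem.Int.floordiv (PySem.Int.floordiv temp 5) f)
            (5 * (f * 5)) (by omega)
          = checkLoop (PySem.Int.floordiv temp 5)
            (c + PySem.Int.floordiv (PySem.Int.floordiv temp 5) f) (f * 5) (by omega) :=
        ih temp (f * 5) _ (by omega) (by omega)
      have harg : (5 * f) * 5 = 5 * (f * 5) := by ring
      calc checkLoop temp (c + PySem.Int.floordiv (PySem.Int.floordiv temp 5) f)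
              ((5 * f) * 5) (by omega)
          = checkLoop temp (c + PySem.Int.floordiv (PySem.Int.floordiv temp 5) f)
              (5 * (f * 5)) (by omega) := by congr 1
        _ = _ := heq
    · have hc' : ¬ f ≤ PySem.Int.floordiv temp 5 := fun h => hc (hiff.mpr h)
      conv_lhs => rw [checkLoop]
      conv_rhs => rw [checkLoop]
      rw [if_neg hc, if_neg hc']

theorem checkLoop_eq_cntB : ∀ (m : Nat) (temp c : Int), temp.toNat ≤ m →
    checkLoop temp c 5 (by norm_num) = c + cntB temp := by
  intro m
  induction m with
  | zero =>
    intro temp c hm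
    conv_lhs => rw [checkLoop]
    rw [if_neg (by omega : ¬ (5:Int) ≤ temp), cntB, if_pos (by omega : temp < 5)]
    ring
  | succ m ih =>
    intro temp c hm
    by_cases hc : (5 : Int) ≤ temp
    · have hd5 : PySem.Int.floordiv temp 5 = temp / 5 :=
        PySem.Int.floordiv_eq_ediv_of_pos (by norm_num)
      conv_lhs => rw [checkLoop]
      rw [if_pos hc]
      have hstep : checkLoop temp (c + PySem.Int.floordiv temp 5) (5 * 5) (by omega)
          = checkLoop (PySem.Int.floordiv temp 5) (c + PySem.Int.floordiv temp 5) 5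
            (by norm_num) :=
        checkLoop_shift (temp + 1 - 25).toNat temp 5 _ (by norm_num) (by omega)
      have hrec : checkLoop (PySem.Int.floordiv temp 5) (c + PySem.Int.floordiv temp 5) 5
          (by norm_num) = (c + PySem.Int.floordiv temp 5) + cntB (PySem.Int.floordiv temp 5) :=
        ih _ _ (by rw [hd5]; omega)
      rw [hstep, hrec]
      conv_rhs => rw [cntB]
      rw [if_neg (by omega : ¬ temp < 5)]
      ring
    · conv_lhs => rw [checkLoop]
      rw [if_neg hc, cntB, if_pos (by omega : temp < 5)]
      ring

-- ===== VERDICT (by name: the statement is the Claim_ definition above) =====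
theorem check_spec : Claim_equal_check := by
  intro p n _
  unfold Spec_check check check_alt
  rw [checkLoop_eq_cntB p.toNat p 0 le_rfl]
  norm_num
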